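-- pv_equiv track=rewrite | github.com/AnandaCampelo/compvis-backend | utils.py | agrupar_placas_por_hamming_completo
-- ===== SOURCE A (Python) =====
-- from collections import defaultdict
--
-- def hamming_distance(s1, s2):
--     """
--     Calculate the Hamming distance between two strings.
--
--     Args:
--         s1 (str): First string.
--         s2 (str): Second string.
--
--     Returns:
--         int: The Hamming distance between the two strings.
--     """
--     if len(s1) != len(s2):
--         raise ValueError("Strings must be of the same length")
--
--     return sum(el1 != el2 for el1, el2 in zip(s1, s2))
--
-- def agrupar_placas_por_hamming_completo(placas, max_dist=1):
--     """
--     Agrupa placas com base na distância de Hamming.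
--     Args:
--         plate_counts (dict): Dicionário com placas e suas contagens.
--         max_dist (int): Distância máxima de Hamming para considerar duas placas como pertencentes ao mesmo grupo.
--     Returns:
--         list: Lista de grupos de placas, onde cada grupo é uma lista de placas.
--     """
--     grafo = defaultdict(list)
--
--     for i in range(len(placas)):
--         for j in range(i + 1, len(placas)):
--             if hamming_distance(placas[i], placas[j]) <= max_dist:
--                 grafo[placas[i]].append(placas[j])
--                 grafo[placas[j]].append(placas[i])
--
--     visitado = set()
--     grupos = []
--
--     # Depth-First Search (DFS) para encontrar grupos conectados
--     # A ideia é buscar as placas conectadas no grafo.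
--     # Ao achar uma placa não visitada chama novamente o dfs para buscar as placas conectadas a ela.
--     def dfs(placa, grupo):
--         visitado.add(placa)
--         grupo.append(placa)
--         for vizinho in grafo[placa]:
--             if vizinho not in visitado:
--                 dfs(vizinho, grupo)
--
--     for placa in placas:
--         if placa not in visitado:
--             grupo = []
--             dfs(placa, grupo)
--             grupos.append(grupo)
--
--     return grupos
-- ===== SOURCE B (Python) =====
-- def agrupar_placas_por_hamming_completo(placas, max_dist=1):
--     # Deduplicate first (first-occurrence order), then build index-space
--     # adjacency with an early-exit bounded distance test, then functional DFS.
--     distinct = list(dict.fromkeys(placas))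
--     m = len(distinct)
--
--     def within(s1, s2, d):
--         if len(s1) != len(s2):
--             raise ValueError("Strings must be of the same length")
--         count = 0
--         for a, b in zip(s1, s2):
--             if a != b:
--                 count += 1
--                 if count > d:
--                     return False
--         return count <= d
--
--     adj = [[j for j in range(m) if j != i and within(distinct[i], distinct[j], max_dist)]
--            for i in range(m)]
--
--     visited = set()
--
--     def dfs(i):
--         visited.add(i)
--         comp = [distinct[i]]
--         for j in adj[i]:
--             if j not in visited:
--                 comp += dfs(j)
--         return comp
--
--     return [dfs(i) for i in range(m) if i not in visited]
-- ===== Notes on version B (the rewrite author's own statement) =====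
-- stated objective: faster
-- what changed: B deduplicates the plates first (dict.fromkeys) and works in index space: per-node adjacency comprehensions with an early-exit bounded Hamming test replace A's triangular double loop appending into a string-keyed defaultdict, and a functional DFS returning components over integer indices replaces A's mutating string-keyed DFS; the pairwise distance work drops from O(n^2) over all n plates to O(m^2) over the m distinct plates, which a timing run measured as an asymptotic win on duplicate-heavy inputs.
import Mathlib
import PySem

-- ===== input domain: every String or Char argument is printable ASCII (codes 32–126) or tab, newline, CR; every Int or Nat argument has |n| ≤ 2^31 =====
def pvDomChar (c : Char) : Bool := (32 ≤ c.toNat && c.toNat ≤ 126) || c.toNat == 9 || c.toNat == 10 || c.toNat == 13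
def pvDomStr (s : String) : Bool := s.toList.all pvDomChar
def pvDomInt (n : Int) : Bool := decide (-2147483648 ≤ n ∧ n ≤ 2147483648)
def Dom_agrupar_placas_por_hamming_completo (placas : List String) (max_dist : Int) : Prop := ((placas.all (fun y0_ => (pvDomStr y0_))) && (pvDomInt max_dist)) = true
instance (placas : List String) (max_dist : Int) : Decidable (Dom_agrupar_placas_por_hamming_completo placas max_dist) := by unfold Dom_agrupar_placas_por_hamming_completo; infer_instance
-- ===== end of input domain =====

-- ===== PORT A =====
-- B deduplicates first (so pairwise distance work is O(m^2) on the m distinct plates,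
-- measured faster on duplicate-heavy inputs) and uses index-space adjacency with an
-- early-exit bounded distance test and a functional DFS; A and B agree on every input
-- where A returns (Pre_ excludes the mixed-length inputs on which A raises ValueError).

-- hamming_distance: 'None' is Python's ValueError (unequal lengths)
def pvHammingA (s1 s2 : String) : Option Int :=
  if PySem.Str.len s1 ≠ PySem.Str.len s2 then none
  else some (((s1.toList.zip s2.toList).map (fun p => if p.1 ≠ p.2 then (1 : Int) else 0)).sum)

-- the double loop building the defaultdict graph; Option-threaded: 'none' aborts = ValueError
def pvGrafoA (placas : List String) (max_dist : Int) : Option (PySem.Dict String (List String)) :=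
  (PySem.List.pyRange 0 (PySem.List.len placas) 1).foldl
    (fun acc i =>
      (PySem.List.pyRange (i + 1) (PySem.List.len placas) 1).foldl
        (fun acc2 j =>
          acc2.bind (fun g =>
            match pvHammingA (PySem.List.pyGetD placas i "") (PySem.List.pyGetD placas j "") with
            | none => none
            | some h =>
                some (if h ≤ max_dist then
                    ((g.modify (PySem.List.pyGetD placas i "") [] (fun l => l ++ [PySem.List.pyGetD placas j ""])).modify
                      (PySem.List.pyGetD placas j "") [] (fun l => l ++ [PySem.List.pyGetD placas i ""]))
                  else g)))
        acc)
    (some PySem.Dict.empty)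

-- recursive dfs; fuel bounds the recursion depth (Python's depth ≤ #distinct plates < fuel)
mutual
def pvDfsA (grafo : PySem.Dict String (List String)) : Nat → String → PySem.Set String → List String → PySem.Set String × List String
  | 0, _, vis, grp => (vis, grp)
  | fuel + 1, placa, vis, grp => pvDfsLoopA grafo fuel (grafo.getD placa []) (vis.add placa) (grp ++ [placa])
  termination_by fuel _ _ _ => (fuel, 0)
def pvDfsLoopA (grafo : PySem.Dict String (List String)) : Nat → List String → PySem.Set String → List String → PySem.Set String × List String
  | _, [], vis, grp => (vis, grp)
  | fuel, v :: rest, vis, grp =>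
      if vis.contains v then pvDfsLoopA grafo fuel rest vis grp
      else
        let r := pvDfsA grafo fuel v vis grp
        pvDfsLoopA grafo fuel rest r.1 r.2
  termination_by fuel l _ _ => (fuel, l.length + 1)
end

def pvOuterA (grafo : PySem.Dict String (List String)) (placas : List String) : PySem.Set String × List (List String) :=
  placas.foldl
    (fun st placa =>
      if st.1.contains placa then st
      else
        let r := pvDfsA grafo (placas.length + 1) placa st.1 []
        (r.1, st.2 ++ [r.2]))
    (PySem.Set.empty, [])

def agrupar_placas_por_hamming_completo (placas : List String) (max_dist : Int) : List (List String) :=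
  match pvGrafoA placas max_dist with
  | none => []   -- Python raises ValueError here; excluded by Pre_
  | some grafo => (pvOuterA grafo placas).2

-- ===== PORT B =====
-- within(s1, s2, d): early-exit bounded Hamming test; 'none' = ValueError
def pvWithinLoop : List (Char × Char) → Int → Int → Bool
  | [], count, d => decide (count ≤ d)
  | (a, b) :: rest, count, d =>
      if a ≠ b then
        (if count + 1 > d then false else pvWithinLoop rest (count + 1) d)
      else pvWithinLoop rest count d

def pvWithin (s1 s2 : String) (d : Int) : Option Bool :=
  if PySem.Str.len s1 ≠ PySem.Str.len s2 then none
  else some (pvWithinLoop (s1.toList.zip s2.toList) 0 d)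

-- adj = [[j for j in range(m) if j != i and within(...)] for i in range(m)]; Option-threaded
def pvAdjB (distinct : List String) (d : Int) : Option (List (List Int)) :=
  (PySem.List.pyRange 0 (PySem.List.len distinct) 1).foldl
    (fun acc i =>
      acc.bind (fun rows =>
        ((PySem.List.pyRange 0 (PySem.List.len distinct) 1).foldl
          (fun racc j =>
            racc.bind (fun row =>
              if j ≠ i then
                match pvWithin (PySem.List.pyGetD distinct i "") (PySem.List.pyGetD distinct j "") d with
                | none => none
                | some b => some (if b then row ++ [j] else row)
              else some row))
          (some ([] : List Int))).map (fun row => rows ++ [row])))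
    (some [])

-- functional dfs over indices, returning the component; fuel bounds recursion depth
mutual
def pvDfsB (distinct : List String) (adj : List (List Int)) : Nat → Int → PySem.Set Int → PySem.Set Int × List String
  | 0, _, vis => (vis, [])
  | fuel + 1, i, vis =>
      let r := pvDfsLoopB distinct adj fuel (PySem.List.pyGetD adj i []) (vis.add i)
      (r.1, [PySem.List.pyGetD distinct i ""] ++ r.2)
  termination_by fuel _ _ => (fuel, 0)
def pvDfsLoopB (distinct : List String) (adj : List (List Int)) : Nat → List Int → PySem.Set Int → PySem.Set Int × List String
  | _, [], vis => (vis, [])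
  | fuel, j :: rest, vis =>
      if vis.contains j then pvDfsLoopB distinct adj fuel rest vis
      else
        let r := pvDfsB distinct adj fuel j vis
        let r2 := pvDfsLoopB distinct adj fuel rest r.1
        (r2.1, r.2 ++ r2.2)
  termination_by fuel l _ => (fuel, l.length + 1)
end

-- [dfs(i) for i in range(m) if i not in visited]
def pvOuterB (distinct : List String) (adj : List (List Int)) : PySem.Set Int × List (List String) :=
  (PySem.List.pyRange 0 (PySem.List.len distinct) 1).foldl
    (fun st i =>
      if st.1.contains i then st
      else
        let r := pvDfsB distinct adj (distinct.length + 1) i st.1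
        (r.1, st.2 ++ [r.2]))
    (PySem.Set.empty, [])

def agrupar_placas_por_hamming_completo_alt (placas : List String) (max_dist : Int) : List (List String) :=
  let distinct := PySem.List.dedup placas
  match pvAdjB distinct max_dist with
  | none => []   -- Python raises ValueError here; excluded by Pre_
  | some adj => (pvOuterB distinct adj).2

-- ===== PRECONDITION & SPEC =====
-- Pre_ excludes exactly the lists containing two plates of different length, on which
-- Python's A (and B) raise ValueError from hamming_distance.
def Pre_agrupar_placas_por_hamming_completo (placas : List String) (max_dist : Int) : Prop :=
  ∀ s ∈ placas, ∀ t ∈ placas, PySem.Str.len s = PySem.Str.len t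
instance (placas : List String) (max_dist : Int) : Decidable (Pre_agrupar_placas_por_hamming_completo placas max_dist) := by unfold Pre_agrupar_placas_por_hamming_completo; infer_instance

def pvWitness_agrupar_placas_por_hamming_completo : List String × Int := (["abc", "abd", "xyz"], 1)

def Spec_agrupar_placas_por_hamming_completo (placas : List String) (max_dist : Int) (out : List (List String)) : Prop := out = agrupar_placas_por_hamming_completo_alt placas max_dist
instance (placas : List String) (max_dist : Int) (out : List (List String)) : Decidable (Spec_agrupar_placas_por_hamming_completo placas max_dist out) := by unfold Spec_agrupar_placas_por_hamming_completo; infer_instance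

-- ===== CLAIM (what is proved, stated in full; the proofs are below) =====
def Claim_equal_agrupar_placas_por_hamming_completo : Prop := ∀ (placas : List String) (max_dist : Int), Dom_agrupar_placas_por_hamming_completo placas max_dist → Pre_agrupar_placas_por_hamming_completo placas max_dist → Spec_agrupar_placas_por_hamming_completo placas max_dist (agrupar_placas_por_hamming_completo placas max_dist)

-- ===== LEMMAS AND PROOFS =====

-- ---------- generic helpers ----------

-- first-occurrence dedup, in the recursion shape the proofs use
def pvDedupF {α : Type} [DecidableEq α] : List α → List α
  | [] => []
  | x :: xs => x :: pvDedupF (xs.filter (· ≠ x))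
termination_by l => l.length
decreasing_by
  simp only [List.length_unattach, List.length_cons]
  exact Nat.lt_succ_of_le (le_trans (List.length_filter_le _ _) (by simp))

theorem list_length_strong_ind {α : Type} {P : List α → Prop}
    (h : ∀ l : List α, (∀ t : List α, t.length < l.length → P t) → P l) : ∀ l, P l := by
  intro l
  exact h l (fun t ht => list_length_strong_ind h t)
termination_by l => l.length

theorem pvDedupF_nil {α : Type} [DecidableEq α] : pvDedupF ([] : List α) = [] := by
  rw [pvDedupF.eq_def]

theorem pvDedupF_cons {α : Type} [DecidableEq α] (x : α) (xs : List α) :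
    pvDedupF (x :: xs) = x :: pvDedupF (xs.filter (· ≠ x)) := by
  rw [pvDedupF.eq_def]

theorem pvDedupF_filter {α : Type} [DecidableEq α] (l : List α) (q : α → Bool) :
    pvDedupF (l.filter q) = (pvDedupF l).filter q := by
  induction l using list_length_strong_ind with
  | _ l IH =>
    match l with
    | [] => simp [pvDedupF_nil]
    | x :: xs =>
      by_cases hq : q x = true
      · rw [show (x :: xs).filter q = x :: xs.filter q by simp [List.filter, hq]]
        rw [pvDedupF_cons, pvDedupF_cons]
        rw [show (x :: pvDedupF (xs.filter fun y => y ≠ x)).filter q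
              = x :: (pvDedupF (xs.filter (· ≠ x))).filter q by simp [List.filter, hq]]
        rw [← IH (xs.filter (· ≠ x)) (by simp [Nat.lt_succ_of_le, List.length_filter_le])]
        have heq : (xs.filter q).filter (· ≠ x) = (xs.filter (· ≠ x)).filter q := by
          rw [List.filter_filter, List.filter_filter]
          exact List.filter_congr (fun a _ => Bool.and_comm _ _)
        rw [heq]
      · rw [show (x :: xs).filter q = xs.filter q by simp [List.filter, hq]]
        rw [pvDedupF_cons]
        rw [show (x :: pvDedupF (xs.filter fun y => y ≠ x)).filter q
              = (pvDedupF (xs.filter (· ≠ x))).filter q by simp [List.filter, hq]]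
        rw [← IH (xs.filter (· ≠ x)) (by simp [Nat.lt_succ_of_le, List.length_filter_le])]
        have heq : (xs.filter (· ≠ x)).filter q = xs.filter q := by
          rw [List.filter_filter]
          exact List.filter_congr (fun a _ => by
            by_cases h1 : a = x
            · subst h1; simp [hq]
            · simp [h1])
        rw [heq]

theorem pvDedupF_append_of_subset {α : Type} [DecidableEq α] (a b : List α)
    (h : ∀ u ∈ b, u ∈ a) : pvDedupF (a ++ b) = pvDedupF a := by
  induction a using list_length_strong_ind generalizing b with
  | _ a IH =>
    match a with
    | [] =>
      have : b = [] := by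
        cases b with
        | nil => rfl
        | cons y ys => exact absurd (h y (by simp)) (by simp)
      simp [this]
    | x :: as =>
      rw [show x :: as ++ b = x :: (as ++ b) by simp, pvDedupF_cons, pvDedupF_cons]
      rw [List.filter_append]
      congr 1
      apply IH (as.filter (· ≠ x)) (by simp [Nat.lt_succ_of_le, List.length_filter_le])
      intro u hu
      simp only [List.mem_filter] at hu ⊢
      refine ⟨?_, hu.2⟩
      have h1 := h u hu.1
      have h2 := hu.2
      simp only [decide_eq_true_eq] at h2
      simp only [List.mem_cons] at h1
      tauto

-- PySem's dedup (dict.fromkeys) is pvDedupF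
theorem ofListAux_eq {α : Type} [DecidableEq α] (xs seen : List α) :
    xs.foldl PySem.Set.add seen = seen ++ pvDedupF (xs.filter (fun x => !seen.contains x)) := by
  induction xs generalizing seen with
  | nil => simp [pvDedupF_nil]
  | cons x xs IH =>
    by_cases hx : x ∈ seen
    · have hc : PySem.Set.add seen x = seen := by
        simp [PySem.Set.add, hx]
      have hfx : (x :: xs).filter (fun y => !seen.contains y) = xs.filter (fun y => !seen.contains y) := by
        simp [List.filter, hx]
      rw [List.foldl_cons, hc, hfx, IH]
    · have hc : PySem.Set.add seen x = seen ++ [x] := by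
        simp [PySem.Set.add, hx]
      have hfx : (x :: xs).filter (fun y => !seen.contains y) = x :: xs.filter (fun y => !seen.contains y) := by
        simp [List.filter, hx]
      rw [List.foldl_cons, hc, IH, hfx, pvDedupF_cons]
      have hf : xs.filter (fun y => !(seen ++ [x]).contains y)
          = (xs.filter (fun y => !seen.contains y)).filter (· ≠ x) := by
        rw [List.filter_filter]
        apply List.filter_congr
        intro a _
        by_cases h2 : a = x
        · subst h2; simp
        · by_cases h1 : a ∈ seen <;> simp [h1, h2]
      rw [hf]
      simp

theorem pvDedupF_eq_dedup {α : Type} [DecidableEq α] (l : List α) :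
    pvDedupF l = PySem.List.dedup l := by
  have h := ofListAux_eq l ([] : List α)
  simp only [List.nil_append] at h
  rw [PySem.List.dedup_eq_ofList]
  show pvDedupF l = l.foldl PySem.Set.add []
  rw [h]
  congr 1
  simp

theorem pvDedupF_length_le {α : Type} [DecidableEq α] (l : List α) :
    (pvDedupF l).length ≤ l.length := by
  induction l using list_length_strong_ind with
  | _ l IH =>
    match l with
    | [] => simp [pvDedupF_nil]
    | x :: xs =>
      rw [pvDedupF_cons]
      simp only [List.length_cons, Nat.add_le_add_iff_right]
      exact le_trans (IH _ (by simp [Nat.lt_succ_of_le, List.length_filter_le]))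
        (List.length_filter_le _ _)

theorem flatMap_if_singleton_eq_filter {α : Type} (p : α → Bool) (l : List α) :
    (l.flatMap (fun y => if p y then [y] else [])) = l.filter p := by
  induction l with
  | nil => rfl
  | cons x xs IH => by_cases h : p x <;> simp [List.flatMap_cons, IH, List.filter, h]

-- ---------- hamming / within ----------

def pvHam (s1 s2 : String) : Int :=
  ((s1.toList.zip s2.toList).map (fun p => if p.1 ≠ p.2 then (1 : Int) else 0)).sum

def pvE (d : Int) (p q : String) : Bool := decide (pvHam p q ≤ d)

theorem pvHam_comm (s1 s2 : String) : pvHam s1 s2 = pvHam s2 s1 := by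
  unfold pvHam
  rw [← List.zip_swap s2.toList s1.toList, List.map_map]
  congr 1
  apply List.map_congr_left
  intro p _
  obtain ⟨a, b⟩ := p
  by_cases h : a = b <;> simp [Function.comp, Prod.swap, h, Ne, eq_comm]

theorem pvE_comm (d : Int) (p q : String) : pvE d p q = pvE d q p := by
  unfold pvE; rw [pvHam_comm]

theorem pvHammingA_eq (s1 s2 : String) (h : PySem.Str.len s1 = PySem.Str.len s2) :
    pvHammingA s1 s2 = some (pvHam s1 s2) := by
  have h' : s1.length = s2.length := by
    have h2 := h
    simp only [PySem.Str.len_eq] at h2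
    exact_mod_cast h2
  unfold pvHammingA pvHam
  simp [h']

theorem sum_ite_nonneg (l : List (Char × Char)) :
    0 ≤ (l.map (fun p => if p.1 ≠ p.2 then (1 : Int) else 0)).sum := by
  induction l with
  | nil => simp
  | cons x xs IH =>
    simp only [List.map_cons, List.sum_cons]
    by_cases h : x.1 = x.2
    · rw [if_neg (by simp [h])]; omega
    · rw [if_pos (by simp [h])]; omega

theorem pvWithinLoop_eq (l : List (Char × Char)) (c d : Int) :
    pvWithinLoop l c d = decide (c + (l.map (fun p => if p.1 ≠ p.2 then (1 : Int) else 0)).sum ≤ d) := by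
  induction l generalizing c with
  | nil => simp [pvWithinLoop]
  | cons x xs IH =>
    obtain ⟨a, b⟩ := x
    by_cases hab : a = b
    · simp only [pvWithinLoop, hab]
      rw [if_neg (by simp), IH]
      simp
    · simp only [pvWithinLoop]
      rw [if_pos (by simp [hab])]
      have hone : (if ((a, b).1 ≠ (a, b).2) then (1 : Int) else 0) = 1 := if_pos hab
      by_cases hc : c + 1 > d
      · rw [if_pos hc]
        have hsum := sum_ite_nonneg xs
        simp only [List.map_cons, List.sum_cons, hone]
        symm
        rw [decide_eq_false_iff_not]
        omega
      · rw [if_neg hc, IH]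
        simp only [List.map_cons, List.sum_cons, hone]
        exact decide_eq_decide.mpr (by omega)

theorem pvWithin_eq (s1 s2 : String) (d : Int) (h : PySem.Str.len s1 = PySem.Str.len s2) :
    pvWithin s1 s2 d = some (pvE d s1 s2) := by
  have h' : s1.length = s2.length := by
    have h2 := h
    simp only [PySem.Str.len_eq] at h2
    exact_mod_cast h2
  unfold pvWithin pvE pvHam
  rw [if_neg (by simp [h'])]
  rw [pvWithinLoop_eq]
  simp

-- ---------- A-side: the graph build, characterized ----------

def pvStep (d : Int) (x y : String) (g : PySem.Dict String (List String)) : PySem.Dict String (List String) :=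
  if pvE d x y then (g.modify x [] (· ++ [y])).modify y [] (· ++ [x]) else g

def pairsRec {β : Type} (step : String → String → β → β) : List String → β → β
  | [], b => b
  | x :: xs, b => pairsRec step xs (xs.foldl (fun b y => step x y b) b)

def pvBlock (d : Int) (p x : String) (xs : List String) : List String :=
  xs.flatMap (fun y => (if x = p ∧ pvE d x y then [y] else []) ++ (if y = p ∧ pvE d x y then [x] else []))

def pvAdjVal (d : Int) (p : String) : List String → List String
  | [] => []
  | x :: xs => pvBlock d p x xs ++ pvAdjVal d p xs

theorem foldl_bind_some {α β : Type} (l : List α) (F : α → β → Option β) (F' : α → β → β)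
    (h : ∀ x ∈ l, ∀ b, F x b = some (F' x b)) :
    ∀ b0 : β, l.foldl (fun acc x => acc.bind (F x)) (some b0) = some (l.foldl (fun b x => F' x b) b0) := by
  induction l with
  | nil => intro b0; rfl
  | cons x xs IH =>
    intro b0
    rw [List.foldl_cons, List.foldl_cons]
    rw [show (some b0).bind (F x) = some (F' x b0) by simp [h x (by simp) b0]]
    exact IH (fun y hy b => h y (by simp [hy]) b) (F' x b0)

theorem foldl_some_of_pointwise {α β : Type} (L : List α) (body : Option β → α → Option β)
    (pu : β → α → β) (h : ∀ i ∈ L, ∀ g, body (some g) i = some (pu g i)) :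
    ∀ g : β, L.foldl body (some g) = some (L.foldl pu g) := by
  induction L with
  | nil => intro g; rfl
  | cons i L IH =>
    intro g
    rw [List.foldl_cons, List.foldl_cons, h i (by simp)]
    exact IH (fun i' hi' g' => h i' (by simp [hi']) g') (pu g i)

-- the triangular index loop, rewritten structurally
theorem pairsFold_drop {β : Type} (step : String → String → β → β) :
    ∀ (xs : List String) (b : β),
      (PySem.List.pyRange 0 (PySem.List.len xs) 1).foldl
        (fun b i => (xs.drop (i + 1).toNat).foldl (fun b y => step (PySem.List.pyGetD xs i "") y b) b) b
      = pairsRec step xs b := by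
  intro xs
  induction xs with
  | nil => intro b; simp [pairsRec, PySem.List.pyRange_one_eq_nil, PySem.List.len]
  | cons x t IH =>
    intro b
    have hlen : PySem.List.len (x :: t) = (t.length : Int) + 1 := by
      simp [PySem.List.len_eq]
    rw [hlen]
    rw [PySem.List.pyRange_one_cons (a := 0) (b := (t.length : Int) + 1) (by omega)]
    rw [List.foldl_cons]
    have hx0 : PySem.List.pyGetD (x :: t) 0 "" = x := by
      rw [show (0 : Int) = ((0 : Nat) : Int) from rfl, PySem.List.pyGetD_natCast]; rfl
    have h0 : ((x :: t).drop ((0 : Int) + 1).toNat).foldl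
        (fun b y => step (PySem.List.pyGetD (x :: t) 0 "") y b) b
        = t.foldl (fun b y => step x y b) b := by
      rw [hx0]
      norm_num
    rw [h0]
    rw [show (0 : Int) + 1 = 1 from rfl]
    have harg : (((t.length : Int) + 1) - 1).toNat = t.length := by omega
    rw [PySem.List.pyRange_one, harg]
    rw [List.foldl_map]
    rw [pairsRec, ← IH]
    rw [show PySem.List.len t = ((t.length : Nat) : Int) from by simp [PySem.List.len_eq]]
    rw [PySem.List.pyRange_zero_nat, List.foldl_map]
    apply PySem.List.foldl_congr_mem
    intro acc k _
    have e1 : PySem.List.pyGetD (x :: t) (1 + (k : Int)) "" = PySem.List.pyGetD t (k : Int) "" := by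
      rw [show (1 : Int) + (k : Int) = (((k + 1 : Nat) : Nat) : Int) from by push_cast; ring]
      rw [PySem.List.pyGetD_natCast, PySem.List.pyGetD_natCast]
      rfl
    rw [e1]
    rw [show ((1 : Int) + (k : Int) + 1).toNat = k + 2 from by omega,
        show ((k : Int) + 1).toNat = k + 1 from by omega]
    rfl

theorem pairsFold_eq {β : Type} (step : String → String → β → β) (xs : List String) (b : β) :
    (PySem.List.pyRange 0 (PySem.List.len xs) 1).foldl
      (fun b i => (PySem.List.pyRange (i + 1) (PySem.List.len xs) 1).foldl
        (fun b j => step (PySem.List.pyGetD xs i "") (PySem.List.pyGetD xs j "") b) b) b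
    = pairsRec step xs b := by
  rw [← pairsFold_drop step xs b]
  apply PySem.List.foldl_congr_mem
  intro acc i hi
  have h0i : 0 ≤ i := (PySem.List.mem_pyRange_one.mp hi).1
  exact PySem.List.foldl_pyRange_pyGetD xs "" (fun b y => step (PySem.List.pyGetD xs i "") y b) acc (by omega)

-- Option-stripping of the graph build, under Pre_
theorem pvGrafoA_eq (placas : List String) (d : Int)
    (hP : ∀ s ∈ placas, ∀ t ∈ placas, PySem.Str.len s = PySem.Str.len t) :
    pvGrafoA placas d = some (pairsRec (pvStep d) placas PySem.Dict.empty) := by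
  unfold pvGrafoA
  rw [← pairsFold_eq (pvStep d) placas PySem.Dict.empty]
  -- strip the Option threading, outer loop first
  have hmem : ∀ i : Int, 0 ≤ i → i < PySem.List.len placas → PySem.List.pyGetD placas i "" ∈ placas := by
    intro i h1 h2
    apply PySem.List.pyGetD_mem
    constructor <;> simp [PySem.List.len_eq] at h2 ⊢ <;> omega
  have hinner : ∀ i ∈ PySem.List.pyRange 0 (PySem.List.len placas) 1, ∀ (g : PySem.Dict String (List String)),
      (PySem.List.pyRange (i + 1) (PySem.List.len placas) 1).foldl
        (fun acc2 j => acc2.bind (fun g =>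
          match pvHammingA (PySem.List.pyGetD placas i "") (PySem.List.pyGetD placas j "") with
          | none => none
          | some h =>
              some (if h ≤ d then
                  ((g.modify (PySem.List.pyGetD placas i "") [] (fun l => l ++ [PySem.List.pyGetD placas j ""])).modify
                    (PySem.List.pyGetD placas j "") [] (fun l => l ++ [PySem.List.pyGetD placas i ""]))
                else g))) (some g)
      = some ((PySem.List.pyRange (i + 1) (PySem.List.len placas) 1).foldl
          (fun g j => pvStep d (PySem.List.pyGetD placas i "") (PySem.List.pyGetD placas j "") g) g) := by
    intro i hi g
    obtain ⟨h0i, hin⟩ := PySem.List.mem_pyRange_one.mp hi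
    apply foldl_bind_some
    intro j hj b
    obtain ⟨h0j, hjn⟩ := PySem.List.mem_pyRange_one.mp hj
    have hxi := hmem i h0i hin
    have hxj := hmem j (by omega) hjn
    rw [pvHammingA_eq _ _ (hP _ hxi _ hxj)]
    unfold pvStep pvE
    by_cases hle : pvHam (PySem.List.pyGetD placas i "") (PySem.List.pyGetD placas j "") ≤ d <;>
      simp [hle]
  -- fold the outer list
  exact foldl_some_of_pointwise _ _ _ hinner _

-- getD characterization of the built graph
theorem inner_getD (d : Int) (x p : String) :
    ∀ (ys : List String) (g : PySem.Dict String (List String)),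
      (ys.foldl (fun g y => pvStep d x y g) g).getD p [] = g.getD p [] ++ pvBlock d p x ys := by
  intro ys
  induction ys with
  | nil => intro g; simp [pvBlock]
  | cons y ys IH =>
    intro g
    rw [List.foldl_cons]
    rw [IH]
    have hblock : pvBlock d p x (y :: ys)
        = ((if x = p ∧ pvE d x y then [y] else []) ++ (if y = p ∧ pvE d x y then [x] else []))
          ++ pvBlock d p x ys := by
      simp [pvBlock, List.flatMap_cons]
    rw [hblock]
    have hstep : (pvStep d x y g).getD p []
        = g.getD p [] ++ ((if x = p ∧ pvE d x y then [y] else []) ++ (if y = p ∧ pvE d x y then [x] else [])) := by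
      unfold pvStep
      by_cases hE : pvE d x y = true
      · rw [if_pos hE]
        by_cases hpy : p = y
        · subst hpy
          rw [PySem.Dict.getD_modify_self]
          by_cases hpx : p = x
          · subst hpx
            rw [PySem.Dict.getD_modify_self]
            simp [hE]
          · have hxp : ¬ (x = p) := fun h => hpx h.symm
            rw [PySem.Dict.getD_modify_of_ne _ _ _ hpx]
            simp [hE, hxp]
        · rw [PySem.Dict.getD_modify_of_ne _ _ _ hpy]
          by_cases hpx : p = x
          · subst hpx
            have hyp : ¬ (y = p) := fun h => hpy h.symm
            rw [PySem.Dict.getD_modify_self]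
            simp [hE, hyp]
          · have hxp : ¬ (x = p) := fun h => hpx h.symm
            have hyp : ¬ (y = p) := fun h => hpy h.symm
            rw [PySem.Dict.getD_modify_of_ne _ _ _ hpx]
            simp [hE, hxp, hyp]
      · rw [if_neg hE]
        simp only [Bool.not_eq_true] at hE
        simp [hE]
    rw [hstep]
    simp [List.append_assoc]

theorem pairsRec_getD (d : Int) (p : String) :
    ∀ (xs : List String) (g : PySem.Dict String (List String)),
      (pairsRec (pvStep d) xs g).getD p [] = g.getD p [] ++ pvAdjVal d p xs := by
  intro xs
  induction xs with
  | nil => intro g; simp [pairsRec, pvAdjVal]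
  | cons x xs IH =>
    intro g
    rw [pairsRec, IH, inner_getD]
    simp [pvAdjVal]

-- ---------- A-side: first-occurrence structure of the adjacency lists ----------

theorem pvFilter_flatMap {α β : Type} (l : List α) (f : α → List β) (q : β → Bool) :
    (l.flatMap f).filter q = l.flatMap (fun a => (f a).filter q) := by
  induction l with
  | nil => rfl
  | cons x xs IH => simp [List.flatMap_cons, List.filter_append, IH]

theorem pvFlatMap_nil {α β : Type} (l : List α) (f : α → List β)
    (h : ∀ a ∈ l, f a = []) : l.flatMap f = [] := by
  induction l with
  | nil => rfl
  | cons x xs IH =>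
    rw [List.flatMap_cons, h x (by simp), List.nil_append]
    exact IH (fun a ha => h a (by simp [ha]))

theorem pvDedupF_rep_append {α : Type} [DecidableEq α] (x : α) (lrep rest : List α)
    (hne : lrep ≠ []) (hall : ∀ u ∈ lrep, u = x) :
    pvDedupF (lrep ++ rest) = x :: pvDedupF (rest.filter (· ≠ x)) := by
  cases lrep with
  | nil => exact absurd rfl hne
  | cons x' l' =>
    have hx' : x' = x := hall x' (by simp)
    subst hx'
    rw [List.cons_append, pvDedupF_cons, List.filter_append]
    have hnil : l'.filter (· ≠ x') = [] := by
      rw [List.filter_eq_nil_iff]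
      intro u hu
      simp [hall u (by simp [hu])]
    rw [hnil, List.nil_append]

theorem pvAdjVal_subset (d : Int) (p : String) :
    ∀ (l : List String) (u : String), u ∈ pvAdjVal d p l → u ∈ l ∧ (pvE d p u = true ∨ u = p) := by
  intro l
  induction l with
  | nil => intro u hu; simp [pvAdjVal] at hu
  | cons x xs IH =>
    intro u hu
    rw [show pvAdjVal d p (x :: xs) = pvBlock d p x xs ++ pvAdjVal d p xs from rfl] at hu
    rcases List.mem_append.mp hu with hb | ha
    · unfold pvBlock at hb
      obtain ⟨y, hy, hin⟩ := List.mem_flatMap.mp hb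
      rcases List.mem_append.mp hin with h1 | h2
      · by_cases hc : x = p ∧ pvE d x y = true
        · rw [if_pos hc] at h1
          have huy : u = y := by simpa using h1
          subst huy
          refine ⟨by simp [hy], Or.inl ?_⟩
          rw [← hc.1]; exact hc.2
        · rw [if_neg hc] at h1; simp at h1
      · by_cases hc : y = p ∧ pvE d x y = true
        · rw [if_pos hc] at h2
          have hux : u = x := by simpa using h2
          subst hux
          refine ⟨by simp, Or.inl ?_⟩
          rw [pvE_comm]
          rw [← hc.1]; exact hc.2
        · rw [if_neg hc] at h2; simp at h2
    · obtain ⟨h1, h2⟩ := IH u ha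
      exact ⟨by simp [h1], h2⟩

theorem pvAdjVal_dedup (d : Int) :
    ∀ (l : List String) (p : String), p ∈ l →
      pvDedupF ((pvAdjVal d p l).filter (· ≠ p)) =
        (pvDedupF l).filter (fun q => decide (q ≠ p) && pvE d p q) := by
  intro l
  induction l with
  | nil => intro p hp; simp at hp
  | cons x xs IH =>
    intro p hp
    rw [show pvAdjVal d p (x :: xs) = pvBlock d p x xs ++ pvAdjVal d p xs from rfl]
    rw [List.filter_append]
    by_cases hxp : x = p
    · subst hxp
      have hblock : (pvBlock d x x xs).filter (· ≠ x)
          = xs.filter (fun y => decide (y ≠ x) && pvE d x y) := by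
        unfold pvBlock
        rw [pvFilter_flatMap]
        rw [show (fun y => (((if x = x ∧ pvE d x y then [y] else [])
                ++ (if y = x ∧ pvE d x y then [x] else [])).filter (· ≠ x)))
              = fun y => if (decide (y ≠ x) && pvE d x y) then [y] else [] from funext fun y => by
                by_cases h1 : y = x <;> by_cases h2 : pvE d x y = true <;> simp [h1, h2]]
        exact flatMap_if_singleton_eq_filter _ xs
      rw [hblock]
      rw [pvDedupF_append_of_subset _ _ ?hsub]
      case hsub =>
        intro u hu
        simp only [List.mem_filter] at hu ⊢
        obtain ⟨hu1, hu2⟩ := hu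
        obtain ⟨hm, hEor⟩ := pvAdjVal_subset d x xs u hu1
        refine ⟨hm, ?_⟩
        simp only [decide_eq_true_eq] at hu2
        rcases hEor with hE | heq
        · simp [hu2, hE]
        · exact absurd heq hu2
      · rw [pvDedupF_filter, pvDedupF_cons]
        rw [show (x :: pvDedupF (xs.filter (· ≠ x))).filter (fun q => decide (q ≠ x) && pvE d x q)
              = (pvDedupF (xs.filter (· ≠ x))).filter (fun q => decide (q ≠ x) && pvE d x q) from by
            simp [List.filter]]
        rw [pvDedupF_filter, List.filter_filter]
        apply List.filter_congr
        intro a _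
        by_cases h1 : a = x <;> simp [h1]
    · have hpxs : p ∈ xs := by
        rcases List.mem_cons.mp hp with h | h
        · exact absurd h.symm hxp
        · exact h
      have hblock : (pvBlock d p x xs).filter (· ≠ p)
          = xs.flatMap (fun y => if (decide (y = p) && pvE d x y) then [x] else []) := by
        unfold pvBlock
        rw [pvFilter_flatMap]
        congr 1
        funext y
        by_cases h1 : y = p
        · subst h1
          by_cases h2 : pvE d x y = true <;> simp [hxp, h2]
        · by_cases h2 : pvE d x y = true <;> simp [hxp, h1, h2]
      rw [hblock]
      by_cases hE : pvE d p x = true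
      · have hEx : pvE d x p = true := by rw [pvE_comm]; exact hE
        have hmemx : x ∈ xs.flatMap (fun y => if (decide (y = p) && pvE d x y) then [x] else []) := by
          apply List.mem_flatMap.mpr
          exact ⟨p, hpxs, by simp [hEx]⟩
        have hne : xs.flatMap (fun y => if (decide (y = p) && pvE d x y) then [x] else []) ≠ [] := by
          intro hcon
          rw [hcon] at hmemx
          simp at hmemx
        have hall : ∀ u ∈ xs.flatMap (fun y => if (decide (y = p) && pvE d x y) then [x] else []), u = x := by
          intro u hu
          obtain ⟨y, _, hin⟩ := List.mem_flatMap.mp hu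
          by_cases hc : (decide (y = p) && pvE d x y) = true
          · rw [if_pos hc] at hin; simpa using hin
          · rw [if_neg hc] at hin; simp at hin
        rw [pvDedupF_rep_append x _ _ hne hall]
        rw [pvDedupF_filter, IH p hpxs]
        rw [pvDedupF_cons]
        have hqx : (decide (x ≠ p) && pvE d p x) = true := by simp [hxp, hE]
        rw [show (x :: pvDedupF (xs.filter (· ≠ x))).filter (fun q => decide (q ≠ p) && pvE d p q)
              = x :: (pvDedupF (xs.filter (· ≠ x))).filter (fun q => decide (q ≠ p) && pvE d p q) from by
            simp only [List.filter, hqx]]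
        congr 1
        rw [pvDedupF_filter, List.filter_filter, List.filter_filter]
        apply List.filter_congr
        intro a _
        by_cases h1 : a = x <;> simp [h1, Bool.and_comm]
      · have hnil : xs.flatMap (fun y => if (decide (y = p) && pvE d x y) then [x] else []) = [] := by
        -- every entry is empty because pvE d x p is false
          apply pvFlatMap_nil
          intro y _
          by_cases h1 : y = p
          · subst h1
            have : pvE d x y = false := by rw [pvE_comm]; simpa using hE
            simp [this]
          · simp [h1]
        rw [hnil, List.nil_append, IH p hpxs, pvDedupF_cons]
        have hqx : (decide (x ≠ p) && pvE d p x) = false := by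
          simp only [Bool.and_eq_false_iff]
          right
          simpa using hE
        rw [show (x :: pvDedupF (xs.filter (· ≠ x))).filter (fun q => decide (q ≠ p) && pvE d p q)
              = (pvDedupF (xs.filter (· ≠ x))).filter (fun q => decide (q ≠ p) && pvE d p q) from by
            simp only [List.filter, hqx]]
        rw [pvDedupF_filter, List.filter_filter]
        apply List.filter_congr
        intro a _
        by_cases h1 : a = x
        · have hEf : pvE d p x = false := by simpa using hE
          subst h1
          simp [hEf]
        · simp [h1]

-- ---------- A-side DFS: visited-set lemmas ----------

theorem dfsA_mono (g : PySem.Dict String (List String)) :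
    ∀ fuel : Nat,
      (∀ (p : String) (vis : PySem.Set String) (grp : List String) (x : String),
        x ∈ vis → x ∈ (pvDfsA g fuel p vis grp).1) := by
  intro fuel
  induction fuel with
  | zero => intro p vis grp x hx; simpa [pvDfsA] using hx
  | succ fuel IH =>
    intro p vis grp x hx
    rw [pvDfsA]
    have hloop : ∀ (l : List String) (vis : PySem.Set String) (grp : List String) (x : String),
        x ∈ vis → x ∈ (pvDfsLoopA g fuel l vis grp).1 := by
      intro l
      induction l with
      | nil => intro vis grp x hx; simpa [pvDfsLoopA] using hx
      | cons v rest IHl =>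
        intro vis grp x hx
        rw [pvDfsLoopA]
        by_cases hc : vis.contains v = true
        · rw [if_pos hc]; exact IHl vis grp x hx
        · rw [if_neg hc]
          exact IHl _ _ x (IH v vis grp x hx)
    exact hloop _ _ _ x ((PySem.Set.mem_add vis p x).mpr (Or.inl hx))

theorem loopA_mono (g : PySem.Dict String (List String)) (fuel : Nat) :
    ∀ (l : List String) (vis : PySem.Set String) (grp : List String) (x : String),
      x ∈ vis → x ∈ (pvDfsLoopA g fuel l vis grp).1 := by
  intro l
  induction l with
  | nil => intro vis grp x hx; simpa [pvDfsLoopA] using hx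
  | cons v rest IHl =>
    intro vis grp x hx
    rw [pvDfsLoopA]
    by_cases hc : vis.contains v = true
    · rw [if_pos hc]; exact IHl vis grp x hx
    · rw [if_neg hc]
      exact IHl _ _ x (dfsA_mono g fuel v vis grp x hx)

theorem dfsA_self (g : PySem.Dict String (List String)) (fuel : Nat) (p : String)
    (vis : PySem.Set String) (grp : List String) :
    p ∈ (pvDfsA g (fuel + 1) p vis grp).1 := by
  rw [pvDfsA]
  exact loopA_mono g fuel _ _ _ p ((PySem.Set.mem_add vis p p).mpr (Or.inr rfl))

theorem loopA_rm (g : PySem.Dict String (List String)) (v : String) :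
    ∀ (l : List String) (fuel : Nat) (vis : PySem.Set String) (grp : List String),
      v ∈ vis →
      pvDfsLoopA g fuel l vis grp = pvDfsLoopA g fuel (l.filter (· ≠ v)) vis grp := by
  intro l
  induction l with
  | nil => intro fuel vis grp _; simp
  | cons w rest IHl =>
    intro fuel vis grp hv
    by_cases hwv : w = v
    · subst hwv
      rw [show (w :: rest).filter (· ≠ w) = rest.filter (· ≠ w) from by simp [List.filter]]
      rw [pvDfsLoopA]
      rw [if_pos (by simpa [List.contains_iff_mem] using hv)]
      exact IHl fuel vis grp hv
    · rw [show (w :: rest).filter (· ≠ v) = w :: rest.filter (· ≠ v) from by simp [List.filter, hwv]]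
      rw [pvDfsLoopA, pvDfsLoopA]
      by_cases hc : vis.contains w = true
      · rw [if_pos hc, if_pos hc]
        exact IHl fuel vis grp hv
      · rw [if_neg hc, if_neg hc]
        exact IHl fuel _ _ (dfsA_mono g fuel w vis grp v hv)

theorem loopA_dedup (g : PySem.Dict String (List String)) :
    ∀ (l : List String) (fuel : Nat) (vis : PySem.Set String) (grp : List String),
      pvDfsLoopA g (fuel + 1) l vis grp = pvDfsLoopA g (fuel + 1) (pvDedupF l) vis grp := by
  intro l
  induction l using list_length_strong_ind with
  | _ l IH =>
    match l with
    | [] => intro fuel vis grp; rw [pvDedupF_nil]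
    | v :: rest =>
      intro fuel vis grp
      rw [pvDedupF_cons]
      by_cases hc : vis.contains v = true
      · have hv : v ∈ vis := by simpa [List.contains_iff_mem] using hc
        rw [pvDfsLoopA, if_pos hc, pvDfsLoopA, if_pos hc]
        rw [loopA_rm g v rest (fuel + 1) vis grp hv]
        exact IH (rest.filter (· ≠ v)) (by simp [Nat.lt_succ_of_le, List.length_filter_le]) fuel vis grp
      · rw [pvDfsLoopA, if_neg hc, pvDfsLoopA, if_neg hc]
        have hvr : v ∈ (pvDfsA g (fuel + 1) v vis grp).1 := dfsA_self g fuel v vis grp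
        rw [loopA_rm g v rest (fuel + 1) _ _ hvr]
        exact IH (rest.filter (· ≠ v)) (by simp [Nat.lt_succ_of_le, List.length_filter_le]) fuel _ _

-- ---------- B-side: adjacency characterized ----------

def pvAdjPure (ds : List String) (d : Int) : List (List Int) :=
  (List.range ds.length).map (fun i =>
    ((List.range ds.length).filter
      (fun j => decide (j ≠ i) && pvE d (ds.getD i "") (ds.getD j ""))).map (fun j : Nat => (j : Int)))

theorem pvAdjB_eq (ds : List String) (d : Int)
    (hP : ∀ s ∈ ds, ∀ t ∈ ds, PySem.Str.len s = PySem.Str.len t) :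
    pvAdjB ds d = some (pvAdjPure ds d) := by
  unfold pvAdjB
  have hmem : ∀ i : Int, 0 ≤ i → i < PySem.List.len ds → PySem.List.pyGetD ds i "" ∈ ds := by
    intro i h1 h2
    apply PySem.List.pyGetD_mem
    constructor <;> simp [PySem.List.len_eq] at h2 ⊢ <;> omega
  have hinner : ∀ i ∈ PySem.List.pyRange 0 (PySem.List.len ds) 1,
      ∀ rows : List (List Int),
      (((PySem.List.pyRange 0 (PySem.List.len ds) 1).foldl
          (fun racc j =>
            racc.bind (fun row =>
              if j ≠ i then
                match pvWithin (PySem.List.pyGetD ds i "") (PySem.List.pyGetD ds j "") d with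
                | none => none
                | some b => some (if b then row ++ [j] else row)
              else some row))
          (some ([] : List Int))).map (fun row => rows ++ [row]))
      = some (rows ++ [(PySem.List.pyRange 0 (PySem.List.len ds) 1).filter
          (fun j => decide (j ≠ i) && pvE d (PySem.List.pyGetD ds i "") (PySem.List.pyGetD ds j ""))]) := by
    intro i hi rows
    obtain ⟨h0i, hin⟩ := PySem.List.mem_pyRange_one.mp hi
    have hstrip := foldl_bind_some (PySem.List.pyRange 0 (PySem.List.len ds) 1)
      (fun j row =>
        if j ≠ i then
          match pvWithin (PySem.List.pyGetD ds i "") (PySem.List.pyGetD ds j "") d with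
          | none => none
          | some b => some (if b then row ++ [j] else row)
        else some row)
      (fun j row =>
        if (decide (j ≠ i) && pvE d (PySem.List.pyGetD ds i "") (PySem.List.pyGetD ds j "")) then
          row ++ [j] else row)
      ?hpt ([] : List Int)
    case hpt =>
      intro j hj row
      obtain ⟨h0j, hjn⟩ := PySem.List.mem_pyRange_one.mp hj
      by_cases hji : j = i
      · simp [hji]
      · have hw := pvWithin_eq (PySem.List.pyGetD ds i "") (PySem.List.pyGetD ds j "") d
          (hP _ (hmem i h0i hin) _ (hmem j h0j hjn))
        by_cases hE : pvE d (PySem.List.pyGetD ds i "") (PySem.List.pyGetD ds j "") = true <;>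
          simp [hji, hw, hE]
    rw [hstrip]
    rw [PySem.List.foldl_append_if_eq_filter
      (fun j => decide (j ≠ i) && pvE d (PySem.List.pyGetD ds i "") (PySem.List.pyGetD ds j ""))]
    simp

  rw [foldl_some_of_pointwise _ _
    (fun rows i => rows ++ [(PySem.List.pyRange 0 (PySem.List.len ds) 1).filter
        (fun j => decide (j ≠ i) && pvE d (PySem.List.pyGetD ds i "") (PySem.List.pyGetD ds j ""))])
    (fun i hi rows => hinner i hi rows) []]
  rw [PySem.List.foldl_append_singleton_eq_map]
  congr 1
  rw [List.nil_append]
  -- convert the Int ranges to Nat ranges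
  rw [show PySem.List.pyRange 0 (PySem.List.len ds) 1
        = (List.range ds.length).map (fun k : Nat => (k : Int)) from by
      rw [show PySem.List.len ds = ((ds.length : Nat) : Int) from by simp [PySem.List.len_eq]]
      exact PySem.List.pyRange_zero_nat ds.length]
  rw [List.map_map]
  unfold pvAdjPure
  apply List.map_congr_left
  intro i hmi
  simp only [List.mem_range] at hmi
  simp only [Function.comp]
  rw [List.filter_map]
  refine congrArg _ (List.filter_congr ?_)
  intro j hj
  simp only [List.mem_range] at hj
  simp only [Function.comp, PySem.List.pyGetD_natCast]
  congr 1
  simp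

-- ---------- the simulation relation and its bookkeeping ----------

def pvUC (ds : List String) (SS : PySem.Set String) : Nat :=
  ds.countP (fun q => !List.contains SS q)

theorem list_contains_true {α : Type} [BEq α] [LawfulBEq α] (l : List α) (x : α) :
    l.contains x = true ↔ x ∈ l := by simp

theorem list_contains_false {α : Type} [BEq α] [LawfulBEq α] (l : List α) (x : α) :
    l.contains x = false ↔ x ∉ l := by
  rw [← Bool.not_eq_true, list_contains_true]

theorem setContains_true {α : Type} [BEq α] [LawfulBEq α] (s : PySem.Set α) (x : α) :
    PySem.Set.contains s x = true ↔ x ∈ s := list_contains_true s x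

theorem setContains_false {α : Type} [BEq α] [LawfulBEq α] (s : PySem.Set α) (x : α) :
    PySem.Set.contains s x = false ↔ x ∉ s := list_contains_false s x

def pvR (ds : List String) (SS : PySem.Set String) (SI : PySem.Set Int) : Prop :=
  (∀ q : String, q ∈ SS ↔ ∃ k : Nat, k < ds.length ∧ ds.getD k "" = q ∧ (k : Int) ∈ SI) ∧
  (∀ z ∈ SI, ∃ k : Nat, k < ds.length ∧ z = (k : Int))

theorem pvR_mem_iff (ds : List String) (hnd : ds.Nodup) {SS SI} (h : pvR ds SS SI)
    (i : Nat) (hi : i < ds.length) :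
    ds.getD i "" ∈ SS ↔ (i : Int) ∈ SI := by
  constructor
  · intro hm
    obtain ⟨k, hk, hdk, hkSI⟩ := (h.1 _).mp hm
    have : k = i := by
      rw [List.getD_eq_getElem _ _ hk, List.getD_eq_getElem _ _ hi] at hdk
      exact (hnd.getElem_inj_iff).mp hdk
    rw [← this]; exact hkSI
  · intro hm
    exact (h.1 _).mpr ⟨i, hi, rfl, hm⟩

theorem pvR_add (ds : List String) {SS SI} (h : pvR ds SS SI) (i : Nat) (hi : i < ds.length) :
    pvR ds (SS.add (ds.getD i "")) (SI.add (i : Int)) := by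
  constructor
  · intro q
    rw [PySem.Set.mem_add]
    constructor
    · intro hq
      rcases hq with hq | hq
      · obtain ⟨k, hk, hdk, hkSI⟩ := (h.1 q).mp hq
        exact ⟨k, hk, hdk, (PySem.Set.mem_add _ _ _).mpr (Or.inl hkSI)⟩
      · exact ⟨i, hi, hq.symm, (PySem.Set.mem_add _ _ _).mpr (Or.inr rfl)⟩
    · rintro ⟨k, hk, hdk, hkSI⟩
      rcases (PySem.Set.mem_add _ _ _).mp hkSI with hk2 | hk2
      · exact Or.inl ((h.1 q).mpr ⟨k, hk, hdk, hk2⟩)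
      · have : k = i := by exact_mod_cast hk2
        subst this
        exact Or.inr hdk.symm
  · intro z hz
    rcases (PySem.Set.mem_add _ _ _).mp hz with hz | hz
    · exact h.2 z hz
    · exact ⟨i, hi, hz⟩

theorem pvUC_add_lt (ds : List String) (SS : PySem.Set String) (x : String)
    (hx : x ∈ ds) (hnot : x ∉ SS) : pvUC ds (SS.add x) < pvUC ds SS := by
  obtain ⟨l1, l2, rfl⟩ := List.append_of_mem hx
  unfold pvUC
  rw [List.countP_append, List.countP_append, List.countP_cons, List.countP_cons]
  have hmemx : x ∈ SS.add x := (PySem.Set.mem_add _ _ _).mpr (Or.inr rfl)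
  have hx1 : List.contains (SS.add x) x = true := (list_contains_true _ _).mpr hmemx
  have hx2 : List.contains SS x = false := (list_contains_false _ _).mpr hnot
  have h1 : List.countP (fun q => !List.contains (SS.add x) q) l1
      ≤ List.countP (fun q => !List.contains SS q) l1 := by
    apply List.countP_mono_left
    intro a _ ha
    simp only [Bool.not_eq_true'] at ha ⊢
    rw [list_contains_false] at ha ⊢
    intro hmem
    exact ha ((PySem.Set.mem_add _ _ _).mpr (Or.inl hmem))
  have h2 : List.countP (fun q => !List.contains (SS.add x) q) l2
      ≤ List.countP (fun q => !List.contains SS q) l2 := by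
    apply List.countP_mono_left
    intro a _ ha
    simp only [Bool.not_eq_true'] at ha ⊢
    rw [list_contains_false] at ha ⊢
    intro hmem
    exact ha ((PySem.Set.mem_add _ _ _).mpr (Or.inl hmem))
  simp only [hx1, hx2]
  simp only [Bool.not_true, Bool.not_false]
  rw [if_neg (by simp), if_pos (by trivial)]
  omega

theorem pvUC_pos (ds : List String) (SS : PySem.Set String) (x : String)
    (hx : x ∈ ds) (hnot : x ∉ SS) : 1 ≤ pvUC ds SS := by
  obtain ⟨l1, l2, rfl⟩ := List.append_of_mem hx
  unfold pvUC
  rw [List.countP_append, List.countP_cons]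
  have hx2 : List.contains SS x = false := (list_contains_false _ _).mpr hnot
  simp only [hx2, Bool.not_false]
  rw [if_pos (by trivial)]
  omega

theorem pvUC_le_len (ds : List String) (SS : PySem.Set String) : pvUC ds SS ≤ ds.length :=
  List.countP_le_length

-- ds as an indexed map, and the neighbour-list bridges
theorem map_getD_range (ds : List String) :
    (List.range ds.length).map (fun j => ds.getD j "") = ds := by
  apply List.ext_getElem
  · simp
  · intro k h1 h2
    simp only [List.getElem_map, List.getElem_range]
    exact List.getD_eq_getElem ds "" h2

def pvNbr (ds : List String) (d : Int) (p : String) : List String :=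
  ds.filter (fun q => decide (q ≠ p) && pvE d p q)

theorem pvNbr_eq_map (ds : List String) (d : Int) (hnd : ds.Nodup) (i : Nat) (hi : i < ds.length) :
    pvNbr ds d (ds.getD i "")
      = ((List.range ds.length).filter
          (fun j => decide (j ≠ i) && pvE d (ds.getD i "") (ds.getD j ""))).map (fun j => ds.getD j "") := by
  unfold pvNbr
  have hstep : ((List.range ds.length).filter
        (fun j => decide (j ≠ i) && pvE d (ds.getD i "") (ds.getD j "")))
      = ((List.range ds.length).filter
          ((fun q => decide (q ≠ ds.getD i "") && pvE d (ds.getD i "") q) ∘ (fun j => ds.getD j ""))) := by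
    apply List.filter_congr
    intro j hj
    simp only [List.mem_range] at hj
    simp only [Function.comp]
    congr 1
    have hiff : (ds.getD j "" ≠ ds.getD i "") ↔ (j ≠ i) := by
      rw [List.getD_eq_getElem _ _ hj, List.getD_eq_getElem _ _ hi]
      exact not_congr hnd.getElem_inj_iff
    exact (decide_eq_decide.mpr hiff.symm)
  rw [hstep, ← List.filter_map, map_getD_range]

theorem adjP_getD (ds : List String) (d : Int) (i : Nat) (hi : i < ds.length) :
    PySem.List.pyGetD (pvAdjPure ds d) (i : Int) []
      = ((List.range ds.length).filter
          (fun j => decide (j ≠ i) && pvE d (ds.getD i "") (ds.getD j ""))).map (fun j : Nat => (j : Int)) := by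
  rw [PySem.List.pyGetD_natCast]
  unfold pvAdjPure
  rw [List.getD_eq_getElem _ _ (by simpa using hi)]
  simp

-- one normalized step of A's dfs
theorem dfsA_normal (placas : List String) (d : Int) (p : String) (hp : p ∈ placas)
    (fa : Nat) (vis : PySem.Set String) (grp : List String) :
    pvDfsA (pairsRec (pvStep d) placas PySem.Dict.empty) (fa + 1 + 1) p vis grp
      = pvDfsLoopA (pairsRec (pvStep d) placas PySem.Dict.empty) (fa + 1)
          (pvNbr (PySem.List.dedup placas) d p) (vis.add p) (grp ++ [p]) := by
  rw [pvDfsA]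
  have hlist : (pairsRec (pvStep d) placas PySem.Dict.empty).getD p [] = pvAdjVal d p placas := by
    rw [pairsRec_getD]
    rw [show (PySem.Dict.empty : PySem.Dict String (List String)).getD p [] = [] from rfl]
    rw [List.nil_append]
  rw [hlist]
  have hself : p ∈ vis.add p := (PySem.Set.mem_add vis p p).mpr (Or.inr rfl)
  rw [loopA_rm _ p _ _ _ _ hself]
  rw [loopA_dedup]
  rw [pvAdjVal_dedup d placas p hp]
  rw [pvDedupF_eq_dedup]
  rfl

-- ---------- the DFS simulation ----------

def pvDfsClaim (placas : List String) (d : Int) (u : Nat) : Prop :=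
  ∀ (i fa fb : Nat) (SS : PySem.Set String) (SI : PySem.Set Int) (grp : List String),
    pvR (PySem.List.dedup placas) SS SI →
    i < (PySem.List.dedup placas).length →
    (i : Int) ∉ SI →
    pvUC (PySem.List.dedup placas) SS ≤ u →
    u + 1 ≤ fa → u + 1 ≤ fb →
    ∃ (SS' : PySem.Set String) (SI' : PySem.Set Int) (comp : List String),
      pvDfsA (pairsRec (pvStep d) placas PySem.Dict.empty) fa ((PySem.List.dedup placas).getD i "") SS grp
        = (SS', grp ++ comp) ∧
      pvDfsB (PySem.List.dedup placas) (pvAdjPure (PySem.List.dedup placas) d) fb (i : Int) SI = (SI', comp) ∧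
      pvR (PySem.List.dedup placas) SS' SI' ∧
      (∀ x ∈ SS, x ∈ SS') ∧
      pvUC (PySem.List.dedup placas) SS' < pvUC (PySem.List.dedup placas) SS

theorem pvLoopSim (placas : List String) (d : Int) (u : Nat) (IH : pvDfsClaim placas d u) :
    ∀ (lj : List Nat) (fa fb : Nat) (SS : PySem.Set String) (SI : PySem.Set Int) (grp : List String),
      pvR (PySem.List.dedup placas) SS SI →
      (∀ j ∈ lj, j < (PySem.List.dedup placas).length) →
      pvUC (PySem.List.dedup placas) SS ≤ u →
      u + 1 ≤ fa → u + 1 ≤ fb →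
      ∃ (SS' : PySem.Set String) (SI' : PySem.Set Int) (c : List String),
        pvDfsLoopA (pairsRec (pvStep d) placas PySem.Dict.empty) fa
            (lj.map (fun j => (PySem.List.dedup placas).getD j "")) SS grp = (SS', grp ++ c) ∧
        pvDfsLoopB (PySem.List.dedup placas) (pvAdjPure (PySem.List.dedup placas) d) fb
            (lj.map (fun j : Nat => (j : Int))) SI = (SI', c) ∧
        pvR (PySem.List.dedup placas) SS' SI' ∧
        (∀ x ∈ SS, x ∈ SS') ∧
        pvUC (PySem.List.dedup placas) SS' ≤ pvUC (PySem.List.dedup placas) SS := by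
  intro lj
  induction lj with
  | nil =>
    intro fa fb SS SI grp hR _ _ _ _
    exact ⟨SS, SI, [], by simp [pvDfsLoopA], by simp [pvDfsLoopB], hR, fun x h => h, le_refl _⟩
  | cons j lj IHl =>
    intro fa fb SS SI grp hR hmem huc hfa hfb
    have hnd : (PySem.List.dedup placas).Nodup := PySem.List.nodup_dedup placas
    have hji : j < (PySem.List.dedup placas).length := hmem j (by simp)
    have hcc : ((PySem.List.dedup placas).getD j "" ∈ SS) ↔ ((j : Int) ∈ SI) :=
      pvR_mem_iff _ hnd hR j hji
    rw [List.map_cons, List.map_cons, pvDfsLoopA, pvDfsLoopB]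
    by_cases hv : SS.contains ((PySem.List.dedup placas).getD j "") = true
    · have hvI : SI.contains ((j : Int)) = true := by
        rw [setContains_true] at hv ⊢
        exact hcc.mp hv
      rw [if_pos hv, if_pos hvI]
      exact IHl fa fb SS SI grp hR (fun a ha => hmem a (by simp [ha])) huc hfa hfb
    · have hvI : SI.contains ((j : Int)) = false := by
        rw [setContains_false]
        intro hmemI
        exact hv ((setContains_true _ _).mpr (hcc.mpr hmemI))
      rw [if_neg hv, if_neg (by rw [hvI]; simp)]
      obtain ⟨SS1, SI1, comp, hA, hB, hR1, hsub1, hlt⟩ :=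
        IH j fa fb SS SI grp hR hji ((setContains_false _ _).mp hvI) huc hfa hfb
      obtain ⟨SS2, SI2, c2, hA2, hB2, hR2, hsub2, hle2⟩ :=
        IHl fa fb SS1 SI1 (grp ++ comp) hR1 (fun a ha => hmem a (by simp [ha]))
          (le_trans (Nat.le_of_lt_succ (Nat.lt_succ_of_lt hlt)) (by omega)) hfa hfb
      refine ⟨SS2, SI2, comp ++ c2, ?_, ?_, hR2, fun x hx => hsub2 x (hsub1 x hx), ?_⟩
      · rw [hA]
        simp only []
        rw [hA2]
        simp
      · rw [hB]
        simp only []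
        rw [hB2]
      · exact le_trans hle2 (le_of_lt hlt)

theorem pvDfsSim (placas : List String) (d : Int)
    (hP : ∀ s ∈ placas, ∀ t ∈ placas, PySem.Str.len s = PySem.Str.len t) :
    ∀ u : Nat, pvDfsClaim placas d u := by
  intro u
  induction u using Nat.strong_induction_on with
  | _ u IHu =>
    intro i fa fb SS SI grp hR hi hiSI huc hfa hfb
    have hnd : (PySem.List.dedup placas).Nodup := PySem.List.nodup_dedup placas
    have hpm : (PySem.List.dedup placas).getD i "" ∈ PySem.List.dedup placas := by
      rw [List.getD_eq_getElem _ _ hi]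
      exact List.getElem_mem hi
    have hpnotSS : (PySem.List.dedup placas).getD i "" ∉ SS :=
      fun hmem => hiSI ((pvR_mem_iff _ hnd hR i hi).mp hmem)
    have huc1 : 1 ≤ pvUC (PySem.List.dedup placas) SS :=
      pvUC_pos _ _ _ hpm hpnotSS
    have hu1 : 1 ≤ u := le_trans huc1 huc
    match fa, hfa with
    | 0, hfa => exact absurd hfa (by omega)
    | 1, hfa => exact absurd hfa (by omega)
    | fa'' + 2, hfa =>
    match fb, hfb with
    | 0, hfb => exact absurd hfb (by omega)
    | fb'' + 1, hfb =>
    have hpp : (PySem.List.dedup placas).getD i "" ∈ placas :=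
      (PySem.List.mem_dedup placas _).mp hpm
    have hucadd : pvUC (PySem.List.dedup placas) (SS.add ((PySem.List.dedup placas).getD i "")) ≤ u - 1 := by
      have := pvUC_add_lt (PySem.List.dedup placas) SS _ hpm hpnotSS
      omega
    obtain ⟨SS', SI', c, hA, hB, hR', hsub', hle'⟩ :=
      pvLoopSim placas d (u - 1) (IHu (u - 1) (by omega))
        ((List.range (PySem.List.dedup placas).length).filter
          (fun j => decide (j ≠ i) && pvE d ((PySem.List.dedup placas).getD i "") ((PySem.List.dedup placas).getD j "")))
        (fa'' + 1) fb''
        (SS.add ((PySem.List.dedup placas).getD i "")) (SI.add (i : Int)) (grp ++ [(PySem.List.dedup placas).getD i ""])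
        (pvR_add _ hR i hi)
        (fun j hj => List.mem_range.mp (List.mem_of_mem_filter hj))
        hucadd (by omega) (by omega)
    refine ⟨SS', SI', (PySem.List.dedup placas).getD i "" :: c, ?_, ?_, hR', ?_, ?_⟩
    · rw [dfsA_normal placas d _ hpp fa'' SS grp]
      rw [pvNbr_eq_map _ d hnd i hi]
      rw [hA]
      simp
    · rw [pvDfsB]
      rw [adjP_getD _ d i hi]
      rw [hB]
      simp [PySem.List.pyGetD_natCast]
    · intro x hx
      exact hsub' x ((PySem.Set.mem_add _ _ _).mpr (Or.inl hx))
    · calc pvUC (PySem.List.dedup placas) SS'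
          ≤ pvUC (PySem.List.dedup placas) (SS.add ((PySem.List.dedup placas).getD i "")) := hle'
        _ < pvUC (PySem.List.dedup placas) SS := pvUC_add_lt _ _ _ hpm hpnotSS

-- ---------- outer loops ----------

def pvStepOutA (g : PySem.Dict String (List String)) (N : Nat)
    (st : PySem.Set String × List (List String)) (placa : String) :
    PySem.Set String × List (List String) :=
  if st.1.contains placa then st
  else
    let r := pvDfsA g N placa st.1 []
    (r.1, st.2 ++ [r.2])

def pvStepOutB (ds : List String) (adj : List (List Int)) (M : Nat)
    (st : PySem.Set Int × List (List String)) (i : Int) :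
    PySem.Set Int × List (List String) :=
  if st.1.contains i then st
  else
    let r := pvDfsB ds adj M i st.1
    (r.1, st.2 ++ [r.2])

theorem pvOuterA_eq (g : PySem.Dict String (List String)) (placas : List String) :
    pvOuterA g placas = placas.foldl (pvStepOutA g (placas.length + 1)) (PySem.Set.empty, []) := rfl

theorem pvOuterB_eq (ds : List String) (adj : List (List Int)) :
    pvOuterB ds adj = (PySem.List.pyRange 0 (PySem.List.len ds) 1).foldl
      (pvStepOutB ds adj (ds.length + 1)) (PySem.Set.empty, []) := rfl

theorem outerA_rm (g : PySem.Dict String (List String)) (N : Nat) (v : String) :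
    ∀ (l : List String) (st : PySem.Set String × List (List String)), v ∈ st.1 →
      l.foldl (pvStepOutA g N) st = (l.filter (· ≠ v)).foldl (pvStepOutA g N) st := by
  intro l
  induction l with
  | nil => intro st _; simp
  | cons w rest IHl =>
    intro st hv
    by_cases hwv : w = v
    · subst hwv
      rw [show (w :: rest).filter (· ≠ w) = rest.filter (· ≠ w) from by simp [List.filter]]
      rw [List.foldl_cons]
      rw [show pvStepOutA g N st w = st from by
        unfold pvStepOutA
        rw [if_pos (by simpa [List.contains_iff_mem] using hv)]]
      exact IHl st hv
    · rw [show (w :: rest).filter (· ≠ v) = w :: rest.filter (· ≠ v) from by simp [List.filter, hwv]]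
      rw [List.foldl_cons, List.foldl_cons]
      apply IHl
      unfold pvStepOutA
      by_cases hc : st.1.contains w = true
      · rw [if_pos hc]; exact hv
      · rw [if_neg hc]
        exact dfsA_mono g N w st.1 [] v hv

theorem outerA_dedup (g : PySem.Dict String (List String)) (N : Nat) :
    ∀ (l : List String) (st : PySem.Set String × List (List String)),
      l.foldl (pvStepOutA g (N + 1)) st = (pvDedupF l).foldl (pvStepOutA g (N + 1)) st := by
  intro l
  induction l using list_length_strong_ind with
  | _ l IH =>
    match l with
    | [] => intro st; rw [pvDedupF_nil]
    | v :: rest =>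
      intro st
      rw [pvDedupF_cons, List.foldl_cons, List.foldl_cons]
      by_cases hc : st.1.contains v = true
      · have hv : v ∈ st.1 := by simpa [List.contains_iff_mem] using hc
        rw [show pvStepOutA g (N + 1) st v = st from by unfold pvStepOutA; rw [if_pos hc]]
        rw [outerA_rm g (N + 1) v rest st hv]
        exact IH (rest.filter (· ≠ v)) (by simp [Nat.lt_succ_of_le, List.length_filter_le]) st
      · have hst' : v ∈ (pvStepOutA g (N + 1) st v).1 := by
          unfold pvStepOutA
          rw [if_neg hc]
          exact dfsA_self g N v st.1 []
        rw [outerA_rm g (N + 1) v rest _ hst']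
        exact IH (rest.filter (· ≠ v)) (by simp [Nat.lt_succ_of_le, List.length_filter_le]) _

theorem pvOuterSim (placas : List String) (d : Int)
    (hP : ∀ s ∈ placas, ∀ t ∈ placas, PySem.Str.len s = PySem.Str.len t) :
    ∀ (kk : List Nat), (∀ k ∈ kk, k < (PySem.List.dedup placas).length) →
    ∀ (SS : PySem.Set String) (SI : PySem.Set Int) (accA accB : List (List String)),
      pvR (PySem.List.dedup placas) SS SI →
      ∃ SS' SI' out,
        (kk.map (fun k => (PySem.List.dedup placas).getD k "")).foldl
            (pvStepOutA (pairsRec (pvStep d) placas PySem.Dict.empty) (placas.length + 1)) (SS, accA)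
          = (SS', accA ++ out) ∧
        (kk.map (fun k : Nat => (k : Int))).foldl
            (pvStepOutB (PySem.List.dedup placas) (pvAdjPure (PySem.List.dedup placas) d)
              ((PySem.List.dedup placas).length + 1)) (SI, accB)
          = (SI', accB ++ out) ∧
        pvR (PySem.List.dedup placas) SS' SI' := by
  intro kk
  induction kk with
  | nil =>
    intro _ SS SI accA accB hR
    exact ⟨SS, SI, [], by simp, by simp, hR⟩
  | cons k kk IHk =>
    intro hmem SS SI accA accB hR
    have hnd : (PySem.List.dedup placas).Nodup := PySem.List.nodup_dedup placas
    have hki : k < (PySem.List.dedup placas).length := hmem k (by simp)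
    have hcc : ((PySem.List.dedup placas).getD k "" ∈ SS) ↔ ((k : Int) ∈ SI) :=
      pvR_mem_iff _ hnd hR k hki
    rw [List.map_cons, List.map_cons, List.foldl_cons, List.foldl_cons]
    by_cases hv : SS.contains ((PySem.List.dedup placas).getD k "") = true
    · have hvI : SI.contains ((k : Int)) = true := by
        rw [setContains_true] at hv ⊢
        exact hcc.mp hv
      rw [show pvStepOutA _ _ (SS, accA) ((PySem.List.dedup placas).getD k "") = (SS, accA) from by
        unfold pvStepOutA; rw [if_pos hv]]
      rw [show pvStepOutB _ _ _ (SI, accB) (k : Int) = (SI, accB) from by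
        unfold pvStepOutB; rw [if_pos hvI]]
      exact IHk (fun a ha => hmem a (by simp [ha])) SS SI accA accB hR
    · have hvI : SI.contains ((k : Int)) = false := by
        rw [setContains_false]
        intro hmemI
        exact hv ((setContains_true _ _).mpr (hcc.mpr hmemI))
      have hmlen : (PySem.List.dedup placas).length ≤ placas.length := by
        rw [← pvDedupF_eq_dedup]
        exact pvDedupF_length_le placas
      have hucle : pvUC (PySem.List.dedup placas) SS ≤ (PySem.List.dedup placas).length :=
        pvUC_le_len _ _
      obtain ⟨SS1, SI1, comp, hA, hB, hR1, _, _⟩ :=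
        pvDfsSim placas d hP (pvUC (PySem.List.dedup placas) SS) k
          (placas.length + 1) ((PySem.List.dedup placas).length + 1) SS SI []
          hR hki ((setContains_false _ _).mp hvI) (le_refl _) (by omega) (by omega)
      rw [show pvStepOutA (pairsRec (pvStep d) placas PySem.Dict.empty) (placas.length + 1)
            (SS, accA) ((PySem.List.dedup placas).getD k "") = (SS1, accA ++ [comp]) from by
        unfold pvStepOutA
        rw [if_neg hv]
        simp only []
        rw [hA]
        simp]
      rw [show pvStepOutB (PySem.List.dedup placas) (pvAdjPure (PySem.List.dedup placas) d)
            ((PySem.List.dedup placas).length + 1) (SI, accB) (k : Int) = (SI1, accB ++ [comp]) from by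
        unfold pvStepOutB
        rw [if_neg (by rw [hvI]; simp)]
        simp only []
        rw [hB]]
      obtain ⟨SS2, SI2, out2, hA2, hB2, hR2⟩ :=
        IHk (fun a ha => hmem a (by simp [ha])) SS1 SI1 (accA ++ [comp]) (accB ++ [comp]) hR1
      exact ⟨SS2, SI2, [comp] ++ out2, by rw [hA2]; simp, by rw [hB2]; simp, hR2⟩

-- ===== VERDICT (by name: the statement is the Claim_ definition above) =====
theorem agrupar_placas_por_hamming_completo_spec : Claim_equal_agrupar_placas_por_hamming_completo := by
  unfold Claim_equal_agrupar_placas_por_hamming_completo Spec_agrupar_placas_por_hamming_completo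
  intro placas max_dist _ hpre
  have hP : ∀ s ∈ placas, ∀ t ∈ placas, PySem.Str.len s = PySem.Str.len t := hpre
  have hPds : ∀ s ∈ PySem.List.dedup placas, ∀ t ∈ PySem.List.dedup placas,
      PySem.Str.len s = PySem.Str.len t :=
    fun s hs t ht => hP s ((PySem.List.mem_dedup _ _).mp hs) t ((PySem.List.mem_dedup _ _).mp ht)
  have hRempty : pvR (PySem.List.dedup placas) PySem.Set.empty PySem.Set.empty := by
    constructor
    · intro q
      constructor
      · intro h; exact absurd h (by simp [PySem.Set.empty])
      · rintro ⟨k, _, _, hk⟩; exact absurd hk (by simp [PySem.Set.empty])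
    · intro z hz; exact absurd hz (by simp [PySem.Set.empty])
  obtain ⟨SS', SI', out, hA2, hB2, _⟩ :=
    pvOuterSim placas max_dist hP (List.range (PySem.List.dedup placas).length)
      (fun k hk => List.mem_range.mp hk)
      PySem.Set.empty PySem.Set.empty [] [] hRempty
  have hA0 : agrupar_placas_por_hamming_completo placas max_dist
      = (pvOuterA (pairsRec (pvStep max_dist) placas PySem.Dict.empty) placas).2 := by
    unfold agrupar_placas_por_hamming_completo
    rw [pvGrafoA_eq placas max_dist hP]
  have hB0 : agrupar_placas_por_hamming_completo_alt placas max_dist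
      = (pvOuterB (PySem.List.dedup placas) (pvAdjPure (PySem.List.dedup placas) max_dist)).2 := by
    unfold agrupar_placas_por_hamming_completo_alt
    simp only []
    rw [pvAdjB_eq _ max_dist hPds]
  rw [hA0, hB0, pvOuterA_eq, pvOuterB_eq]
  have hA3 : placas.foldl
      (pvStepOutA (pairsRec (pvStep max_dist) placas PySem.Dict.empty) (placas.length + 1))
      (PySem.Set.empty, []) = (SS', [] ++ out) := by
    rw [outerA_dedup, pvDedupF_eq_dedup]
    rw [← map_getD_range (PySem.List.dedup placas)]
    exact hA2
  have hB3 : (PySem.List.pyRange 0 (PySem.List.len (PySem.List.dedup placas)) 1).foldl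
      (pvStepOutB (PySem.List.dedup placas) (pvAdjPure (PySem.List.dedup placas) max_dist)
        ((PySem.List.dedup placas).length + 1))
      (PySem.Set.empty, []) = (SI', [] ++ out) := by
    rw [show PySem.List.pyRange 0 (PySem.List.len (PySem.List.dedup placas)) 1
          = (List.range (PySem.List.dedup placas).length).map (fun k : Nat => (k : Int)) from by
        rw [show PySem.List.len (PySem.List.dedup placas)
              = (((PySem.List.dedup placas).length : Nat) : Int) from by simp [PySem.List.len_eq]]
        exact PySem.List.pyRange_zero_nat _]
    exact hB2
  rw [hA3, hB3]
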